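-- pv_equiv track=rewrite | github.com/leptonai/leptonai | leptonai/cli/photon.py | _sequentialize_pip_commands
-- ===== SOURCE A (Python) =====
-- from typing import Optional, List, Tuple
--
-- def _sequentialize_pip_commands(commands: List[str]) -> List[Tuple[str, List[str]]]:
--     """
--     Sequentializes a list of pip commands to a sequence of installation and uninstallations.
--     """
--     chunks = []
--     current_command = None
--     current_list = []
--     LEN_UNINSTALL_PREFIX = len("uninstall ")
--
--     for lib in commands:
--         if lib.startswith("uninstall "):
--             lib = lib[LEN_UNINSTALL_PREFIX:].strip()
--             command = "uninstall"
--         else: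
--             lib = lib.strip()
--             command = "install"
--             # If the current command is different or hasn't been set yet
--         if current_command != command:
--             if current_list:
--                 # if there's any commands accumulated, add them to the chunks
--                 chunks.append((current_command, current_list))
--             current_list = [lib]
--             current_command = command
--         else:
--             # within the same installation/uninstallation group, we can safely
--             # do dedup.
--             if lib not in current_list:
--                 current_list.append(lib)
--
--     # Adding any remaining commands
--     if current_list:
--         chunks.append((current_command, current_list))
--
--     return chunks
-- ===== SOURCE B (Python) =====
-- def _sequentialize_pip_commands(commands):
--     """Parse first, then group consecutive runs and dedup each run."""
--     def parse(s):
--         if s.startswith("uninstall "):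
--             return ("uninstall", s[len("uninstall "):].strip())
--         return ("install", s.strip())
--
--     pairs = [parse(s) for s in commands]
--     chunks = []
--     i = 0
--     n = len(pairs)
--     while i < n:
--         cmd = pairs[i][0]
--         j = i
--         while j < n and pairs[j][0] == cmd:
--             j += 1
--         chunks.append((cmd, list(dict.fromkeys(lib for _, lib in pairs[i:j]))))
--         i = j
--     return chunks
-- ===== Notes on version B (the rewrite author's own statement) =====
-- stated objective: faster
-- what changed: Replaces A's single stateful loop (current_command/current_list accumulator with flush-on-change and a linear 'lib not in current_list' scan per element) by a two-phase pipeline: parse every command into a (command, lib) pair first, then group consecutive same-command runs by an index-span scan and dedup each run with dict.fromkeys (hash-based).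
import Mathlib
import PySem

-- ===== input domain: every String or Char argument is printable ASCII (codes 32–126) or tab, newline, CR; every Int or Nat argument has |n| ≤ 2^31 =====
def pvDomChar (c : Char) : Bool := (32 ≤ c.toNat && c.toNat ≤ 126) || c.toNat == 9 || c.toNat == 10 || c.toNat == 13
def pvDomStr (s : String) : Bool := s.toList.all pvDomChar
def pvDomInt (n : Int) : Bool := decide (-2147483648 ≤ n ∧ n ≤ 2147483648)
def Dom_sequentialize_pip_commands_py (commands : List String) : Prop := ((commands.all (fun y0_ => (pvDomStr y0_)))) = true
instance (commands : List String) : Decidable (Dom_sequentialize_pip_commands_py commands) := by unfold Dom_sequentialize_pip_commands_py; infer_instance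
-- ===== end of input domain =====

-- B re-decomposes A's single stateful loop into parse-then-group-runs with hash-based per-run dedup (objective: faster, measured).

-- ===== PORT A =====
-- A's loop state: (chunks, current_command, current_list); current_command is None only while
-- current_list = [], so `.getD ""` when appending never affects the value.
def pvStepA (st : List (String × List String) × Option String × List String) (lib : String) :
    List (String × List String) × Option String × List String :=
  match st with
  | (chunks, cc, cl) =>
    let p : String × String :=
      if PySem.Str.startswith lib "uninstall " then
        ("uninstall", PySem.Str.strip (PySem.Str.slice lib (some 10) none))
      else
        ("install", PySem.Str.strip lib)
    match p with
    | (command, lib) =>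
      if cc ≠ some command then
        if cl ≠ [] then (chunks ++ [(cc.getD "", cl)], some command, [lib])
        else (chunks, some command, [lib])
      else
        (chunks, cc, if lib ∈ cl then cl else cl ++ [lib])

def sequentialize_pip_commands_py (commands : List String) : List (String × List String) :=
  match commands.foldl pvStepA ([], none, []) with
  | (chunks, cc, cl) => if cl ≠ [] then chunks ++ [(cc.getD "", cl)] else chunks

-- ===== PORT B =====
-- parse(s) = (command, lib)
def pvParse (s : String) : String × String :=
  if PySem.Str.startswith s "uninstall " then
    ("uninstall", PySem.Str.strip (PySem.Str.slice s (some 10) none))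
  else
    ("install", PySem.Str.strip s)

-- list(dict.fromkeys(...)): insertion-order keys with duplicates dropped (exact port)
def pvDedup (xs : List String) : List String :=
  xs.foldl (fun acc l => if l ∈ acc then acc else acc ++ [l]) []

-- the inner `while j < n and pairs[j][0] == cmd` scan: libs of the run, and the remainder
def pvRun (cmd : String) : List (String × String) → List String × List (String × String)
  | [] => ([], [])
  | (c, l) :: rest =>
    if c = cmd then
      match pvRun cmd rest with
      | (ls, r) => (l :: ls, r)
    else ([], (c, l) :: rest)

lemma pvRun_length_le (cmd : String) (ps : List (String × String)) :
    (pvRun cmd ps).2.length ≤ ps.length := by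
  induction ps with
  | nil => simp [pvRun]
  | cons hd tl ih =>
    obtain ⟨c, l⟩ := hd
    rw [pvRun]
    split
    · cases h : pvRun cmd tl with
      | mk ls r => rw [h] at ih; simpa using Nat.le_succ_of_le ih
    · simp

-- the outer `while i < n` loop over runs
def pvGroup : List (String × String) → List (String × List String)
  | [] => []
  | (c, l) :: rest =>
    (c, pvDedup (l :: (pvRun c rest).1)) :: pvGroup (pvRun c rest).2
termination_by ps => ps.length
decreasing_by simpa using Nat.lt_succ_of_le (pvRun_length_le c rest)

def sequentialize_pip_commands_py_alt (commands : List String) : List (String × List String) :=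
  pvGroup (commands.map pvParse)

-- ===== PRECONDITION & SPEC =====
def Spec_sequentialize_pip_commands_py (commands : List String) (out : List (String × List String)) : Prop := out = sequentialize_pip_commands_py_alt commands
instance (commands : List String) (out : List (String × List String)) : Decidable (Spec_sequentialize_pip_commands_py commands out) := by unfold Spec_sequentialize_pip_commands_py; infer_instance

-- ===== CLAIM (what is proved, stated in full; the proofs are below) =====
def Claim_equal_sequentialize_pip_commands_py : Prop := ∀ (commands : List String), Dom_sequentialize_pip_commands_py commands → Spec_sequentialize_pip_commands_py commands (sequentialize_pip_commands_py commands)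

-- ===== LEMMAS AND PROOFS =====

lemma pvGroup_nil : pvGroup [] = [] := by rw [pvGroup]

lemma pvGroup_cons (c l : String) (rest : List (String × String)) :
    pvGroup ((c, l) :: rest)
      = (c, pvDedup (l :: (pvRun c rest).1)) :: pvGroup (pvRun c rest).2 := by
  rw [pvGroup]

-- A's step on a parsed pair
def pvStepA' (st : List (String × List String) × Option String × List String)
    (p : String × String) : List (String × List String) × Option String × List String :=
  match st, p with
  | (chunks, cc, cl), (command, lib) =>
    if cc ≠ some command then
      if cl ≠ [] then (chunks ++ [(cc.getD "", cl)], some command, [lib])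
      else (chunks, some command, [lib])
    else
      (chunks, cc, if lib ∈ cl then cl else cl ++ [lib])

lemma pvStepA_eq (st : List (String × List String) × Option String × List String) (lib : String) :
    pvStepA st lib = pvStepA' st (pvParse lib) := by
  obtain ⟨chunks, cc, cl⟩ := st
  simp only [pvStepA, pvStepA', pvParse]

def pvFinalize (st : List (String × List String) × Option String × List String) :
    List (String × List String) :=
  match st with
  | (chunks, cc, cl) => if cl ≠ [] then chunks ++ [(cc.getD "", cl)] else chunks

lemma pvMain (ps : List (String × String)) :
    ∀ (chunks : List (String × List String)) (c : String) (cl : List String), cl ≠ [] →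
    pvFinalize (ps.foldl pvStepA' (chunks, some c, cl))
      = chunks ++ ((c, (pvRun c ps).1.foldl
            (fun acc l => if l ∈ acc then acc else acc ++ [l]) cl) :: pvGroup (pvRun c ps).2) := by
  induction ps with
  | nil =>
    intro chunks c cl hcl
    simp [pvFinalize, pvRun, pvGroup_nil, hcl]
  | cons hd rest ih =>
    intro chunks c cl hcl
    obtain ⟨c', l'⟩ := hd
    by_cases hc : c' = c
    · subst hc
      have hstep : pvStepA' (chunks, some c', cl) (c', l')
          = (chunks, some c', if l' ∈ cl then cl else cl ++ [l']) := by
        simp [pvStepA']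
      have hcl' : (if l' ∈ cl then cl else cl ++ [l']) ≠ [] := by
        split <;> simp_all
      rw [List.foldl_cons, hstep, ih chunks c' _ hcl']
      simp [pvRun]
    · have hstep : pvStepA' (chunks, some c, cl) (c', l')
          = (chunks ++ [(c, cl)], some c', [l']) := by
        simp [pvStepA', hcl, Ne.symm hc]
      rw [List.foldl_cons, hstep, ih (chunks ++ [(c, cl)]) c' [l'] (by simp)]
      have hrun : pvRun c ((c', l') :: rest) = ([], (c', l') :: rest) := by
        simp [pvRun, hc]
      rw [hrun, pvGroup_cons]
      simp [pvDedup, List.append_assoc]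

-- ===== VERDICT (by name: the statement is the Claim_ definition above) =====
theorem sequentialize_pip_commands_py_spec : Claim_equal_sequentialize_pip_commands_py := by
  intro commands _
  unfold Spec_sequentialize_pip_commands_py sequentialize_pip_commands_py sequentialize_pip_commands_py_alt
  have hfun : pvStepA = fun st lib => pvStepA' st (pvParse lib) :=
    funext fun st => funext fun lib => pvStepA_eq st lib
  have hfold : commands.foldl pvStepA ([], none, [])
      = (commands.map pvParse).foldl pvStepA' ([], none, []) := by
    rw [List.foldl_map, hfun]
  cases commands with
  | nil => simp [pvGroup_nil]
  | cons s rest =>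
    show pvFinalize ((s :: rest).foldl pvStepA ([], none, [])) = _
    rw [hfold]
    simp only [List.map_cons, List.foldl_cons]
    cases hp : pvParse s with
    | mk c l =>
      have hstep : pvStepA' ([], none, []) (c, l) = ([], some c, [l]) := by
        simp [pvStepA']
      rw [hstep, pvMain (rest.map pvParse) [] c [l] (by simp), pvGroup_cons]
      simp [pvDedup]
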